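-- pv_equiv track=rewrite | github.com/sherifdarwish/social-media | src/agents/platform_agents/linkedin_agent.py | _format_long_content
-- ===== SOURCE A (Python) =====
-- def _format_long_content(text: str) -> str:
--     """Format long content for better LinkedIn readability."""
--     # Add line breaks for better readability
--     sentences = text.split('. ')
--     formatted_sentences = []
--
--     for i, sentence in enumerate(sentences):
--         formatted_sentences.append(sentence)
--         # Add line break every 2-3 sentences
--         if (i + 1) % 3 == 0 and i < len(sentences) - 1:
--             formatted_sentences.append('\n')
--
--     return '. '.join(formatted_sentences)
-- ===== SOURCE B (Python) =====
-- def _format_long_content(text: str) -> str: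
--     """Format long content for better LinkedIn readability."""
--     sentences = text.split('. ')
--     chunks = [sentences[i:i+3] for i in range(0, len(sentences), 3)]
--     return '. \n. '.join('. '.join(chunk) for chunk in chunks)
-- ===== Notes on version B (the rewrite author's own statement) =====
-- stated objective: alternative
-- what changed: Instead of an enumerated loop that conditionally appends newline elements after every third sentence before a single join, B chunks the sentence list into consecutive triples, joins each triple with the sentence separator, and joins the triples with the composite separator (sentence separator, newline, sentence separator).
import Mathlib
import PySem

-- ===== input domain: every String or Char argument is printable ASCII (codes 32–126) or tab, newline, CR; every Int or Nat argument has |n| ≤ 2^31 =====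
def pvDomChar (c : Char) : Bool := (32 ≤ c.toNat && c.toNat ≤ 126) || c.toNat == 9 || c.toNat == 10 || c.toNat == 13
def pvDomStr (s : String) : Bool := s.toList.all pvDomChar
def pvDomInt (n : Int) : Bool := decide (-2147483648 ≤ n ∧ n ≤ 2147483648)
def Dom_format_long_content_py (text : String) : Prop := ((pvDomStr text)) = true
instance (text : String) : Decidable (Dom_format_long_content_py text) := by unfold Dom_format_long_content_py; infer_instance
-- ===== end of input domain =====

-- B replaces the indexed loop that conditionally inserts '\n' elements by chunking the
-- sentence list into triples and double-joining ('. ' inside a chunk, '. \n. ' between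
-- chunks); same output, different decomposition (objective: alternative).

-- ===== PORT A =====
def format_long_content_py (text : String) : String :=
  let sentences := PySem.Chars.splitOn text.toList ". ".toList
  let formatted := (PySem.List.enumerate sentences).foldl
    (fun acc p =>
      let acc := acc ++ [p.2]
      if PySem.Int.mod (p.1 + 1) 3 == 0 && decide (p.1 < (sentences.length : Int) - 1) then
        acc ++ ["\n".toList]
      else acc) []
  String.ofList (PySem.Chars.join ". ".toList formatted)

-- ===== PORT B =====
-- helper for B's 'while sentences: chunks.append(sentences[:3]); sentences = sentences[3:]'
def pvChunk3 (l : List (List Char)) : List (List (List Char)) :=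
  if _h : l = [] then []
  else
    PySem.List.slice l none (some 3) :: pvChunk3 (PySem.List.slice l (some 3) none)
termination_by l.length
decreasing_by
  rw [PySem.List.slice_from l (by norm_num : (0:Int) ≤ 3)]
  have : l.length ≠ 0 := fun h0 => _h (List.eq_nil_of_length_eq_zero h0)
  simp; omega

def format_long_content_py_alt (text : String) : String :=
  let sentences := PySem.Chars.splitOn text.toList ". ".toList
  String.ofList
    (PySem.Chars.join ". \n. ".toList ((pvChunk3 sentences).map (PySem.Chars.join ". ".toList)))

-- ===== PRECONDITION & SPEC =====
def Spec_format_long_content_py (text : String) (out : String) : Prop := out = format_long_content_py_alt text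
instance (text : String) (out : String) : Decidable (Spec_format_long_content_py text out) := by unfold Spec_format_long_content_py; infer_instance

-- ===== CLAIM (what is proved, stated in full; the proofs are below) =====
def Claim_equal_format_long_content_py : Prop := ∀ (text : String), Dom_format_long_content_py text → Spec_format_long_content_py text (format_long_content_py text)

-- ===== LEMMAS AND PROOFS =====

-- the per-element contribution of A's loop (n = total number of sentences)
def pvG (n : Int) (p : Int × List Char) : List (List Char) :=
  if PySem.Int.mod (p.1 + 1) 3 == 0 && decide (p.1 < n - 1) then [p.2, "\n".toList] else [p.2]

theorem pvEnum_cons {α : Type} (x : α) (t : List α) (k : Int) :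
    PySem.List.enumerate (x :: t) k = (k, x) :: PySem.List.enumerate t (k + 1) := by
  simp [PySem.List.enumerate]

theorem pvChunk3_nil : pvChunk3 [] = [] := by rw [pvChunk3]; simp

theorem pvChunk3_cons (l : List (List Char)) (h : l ≠ []) :
    pvChunk3 l = l.take 3 :: pvChunk3 (l.drop 3) := by
  rw [pvChunk3]
  simp [h, PySem.List.slice_to _ (by norm_num : (0:Int) ≤ 3),
        PySem.List.slice_from _ (by norm_num : (0:Int) ≤ 3)]

theorem pvG_shift (n k d : Int) (h : d % 3 = 0) (x : List Char) :
    pvG (k + d + n) (k + d, x) = pvG (k + n) (k, x) := by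
  unfold pvG
  have hm : PySem.Int.mod (k + d + 1) 3 = PySem.Int.mod (k + 1) 3 := by
    simp [PySem.Int.mod, Int.fmod_eq_emod]; omega
  have hd : decide (k + d < k + d + n - 1) = decide (k < k + n - 1) :=
    decide_eq_decide.mpr (by omega)
  rw [hm, hd]

theorem pvShift (t : List (List Char)) (k d : Int) (h : d % 3 = 0) :
    (PySem.List.enumerate t (k + d)).flatMap (pvG (k + d + t.length)) =
      (PySem.List.enumerate t k).flatMap (pvG (k + t.length)) := by
  induction t generalizing k with
  | nil => simp [PySem.List.enumerate]
  | cons x t ih =>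
    rw [pvEnum_cons, pvEnum_cons, List.flatMap_cons, List.flatMap_cons]
    rw [pvG_shift _ k d h x]
    congr 1
    have e1 : k + d + (((x :: t).length : Nat) : Int) = (k + 1) + d + (t.length : Int) := by
      simp; ring
    have e2 : k + d + 1 = (k + 1) + d := by ring
    have e3 : k + (((x :: t).length : Nat) : Int) = (k + 1) + (t.length : Int) := by
      simp; ring
    rw [e1, e2, e3]
    exact ih (k + 1)

theorem pvShift3 (t : List (List Char)) :
    (PySem.List.enumerate t 3).flatMap (pvG (3 + t.length)) =
      (PySem.List.enumerate t 0).flatMap (pvG t.length) := by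
  have := pvShift t 0 3 (by norm_num)
  simpa using this

theorem pvH_ne (n k : Int) (x : List Char) (t : List (List Char)) :
    (PySem.List.enumerate (x :: t) k).flatMap (pvG n) ≠ [] := by
  rw [pvEnum_cons, List.flatMap_cons]
  unfold pvG
  split <;> simp

theorem pvJoin_cons_of_ne (sep p : List Char) (rest : List (List Char)) (h : rest ≠ []) :
    PySem.Chars.join sep (p :: rest) = p ++ sep ++ PySem.Chars.join sep rest := by
  cases rest with
  | nil => exact absurd rfl h
  | cons q r => exact PySem.Chars.join_cons_cons sep p q r

-- the main equivalence: A's decorated sentence list joined with '. '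
-- equals B's triple chunks joined inside with '. ' and between with '. \n. '
theorem pvMain (l : List (List Char)) :
    PySem.Chars.join ". ".toList ((PySem.List.enumerate l 0).flatMap (pvG l.length)) =
      PySem.Chars.join ". \n. ".toList ((pvChunk3 l).map (PySem.Chars.join ". ".toList)) := by
  match l with
  | [] => simp [PySem.List.enumerate, pvChunk3_nil, PySem.Chars.join_nil]
  | [a] =>
      rw [pvChunk3_cons _ (by simp)]
      simp [pvChunk3_nil, PySem.List.enumerate, pvG, PySem.Chars.join_singleton,
            PySem.Int.mod, Int.fmod_eq_emod]
  | [a, b] =>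
      rw [pvChunk3_cons _ (by simp)]
      simp [pvChunk3_nil, PySem.List.enumerate, pvG, PySem.Chars.join_singleton,
            PySem.Int.mod, Int.fmod_eq_emod]
  | [a, b, c] =>
      rw [pvChunk3_cons _ (by simp)]
      simp [pvChunk3_nil, PySem.List.enumerate, pvG, PySem.Chars.join_singleton,
            PySem.Int.mod, Int.fmod_eq_emod]
  | a :: b :: c :: x :: t =>
      have ih := pvMain (x :: t)
      have hchunk : pvChunk3 (a :: b :: c :: x :: t) = [a, b, c] :: pvChunk3 (x :: t) := by
        rw [pvChunk3_cons _ (by simp)]; simp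
      have hlen : ((a :: b :: c :: x :: t).length : Int) = 3 + ((x :: t).length : Int) := by
        simp; ring
      have hA : (PySem.List.enumerate (a :: b :: c :: x :: t) 0).flatMap
            (pvG ((a :: b :: c :: x :: t).length : Int)) =
          [a, b, c, "\n".toList] ++
            (PySem.List.enumerate (x :: t) 0).flatMap (pvG ((x :: t).length : Int)) := by
        rw [pvEnum_cons, pvEnum_cons, pvEnum_cons]
        rw [List.flatMap_cons, List.flatMap_cons, List.flatMap_cons]
        have g0 : pvG ((a :: b :: c :: x :: t).length : Int) (0, a) = [a] := by
          simp [pvG, PySem.Int.mod, Int.fmod_eq_emod]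
        have g1 : pvG ((a :: b :: c :: x :: t).length : Int) (0 + 1, b) = [b] := by
          simp [pvG, PySem.Int.mod, Int.fmod_eq_emod]
        have g2 : pvG ((a :: b :: c :: x :: t).length : Int) (0 + 1 + 1, c) =
            [c, "\n".toList] := by
          simp [pvG, PySem.Int.mod]
        rw [g0, g1, g2]
        have e0 : (0:Int) + 1 + 1 + 1 = 3 := by norm_num
        rw [e0, hlen, pvShift3 (x :: t)]
        simp
      rw [hA, hchunk, List.map_cons]
      have hne := pvH_ne ((x :: t).length : Int) 0 x t
      have hBne : (pvChunk3 (x :: t)).map (PySem.Chars.join ". ".toList) ≠ [] := by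
        rw [pvChunk3_cons _ (by simp)]; simp
      rw [show ([a, b, c, "\n".toList] ++
            (PySem.List.enumerate (x :: t) 0).flatMap (pvG ((x :: t).length : Int)))
          = a :: b :: c :: "\n".toList ::
            (PySem.List.enumerate (x :: t) 0).flatMap (pvG ((x :: t).length : Int)) from rfl]
      rw [pvJoin_cons_of_ne _ a _ (by simp),
          pvJoin_cons_of_ne _ b _ (by simp),
          pvJoin_cons_of_ne _ c _ (by simp),
          pvJoin_cons_of_ne _ _ _ hne,
          pvJoin_cons_of_ne _ _ _ hBne]
      rw [ih]
      rw [show PySem.Chars.join ". ".toList [a, b, c]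
            = a ++ ". ".toList ++ PySem.Chars.join ". ".toList [b, c] from
          PySem.Chars.join_cons_cons _ _ _ _,
          show PySem.Chars.join ". ".toList [b, c]
            = b ++ ". ".toList ++ PySem.Chars.join ". ".toList [c] from
          PySem.Chars.join_cons_cons _ _ _ _,
          PySem.Chars.join_singleton]
      simp
termination_by l.length
decreasing_by simp

-- ===== VERDICT (by name: the statement is the Claim_ definition above) =====
theorem format_long_content_py_spec : Claim_equal_format_long_content_py := by
  intro text _
  unfold Spec_format_long_content_py format_long_content_py format_long_content_py_alt
  dsimp only
  generalize PySem.Chars.splitOn text.toList ". ".toList = sents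
  have hfun : (fun (acc : List (List Char)) (p : Int × List Char) =>
      let acc := acc ++ [p.2]
      if PySem.Int.mod (p.1 + 1) 3 == 0 && decide (p.1 < (sents.length : Int) - 1) then
        acc ++ ["\n".toList]
      else acc) = (fun acc p => acc ++ pvG (sents.length : Int) p) := by
    funext acc p
    simp only [pvG]
    split <;> simp
  rw [hfun, PySem.List.foldl_append_eq_flatMap]
  simp only [List.nil_append]
  exact congrArg String.ofList (pvMain sents)
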